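-- pv_equiv track=rewrite | github.com/hughy603/reference-python-project | scripts/generate_api_docs.py | generate_package_index
-- ===== SOURCE A (Python) =====
-- PACKAGE_NAME = "enterprise_data_engineering"
--
-- def generate_package_index(modules: list[str]) -> str:
--     """Generate an index of all modules."""
--     doc = f"# {PACKAGE_NAME} API Reference\n\n"
--     doc += "This section provides detailed API documentation for all modules in the package.\n\n"
--
--     # Organize modules by hierarchy
--     module_tree = {}
--     for module in modules:
--         parts = module.split(".")
--         current = module_tree
--         for part in parts:
--             if part not in current:
--                 current[part] = {}
--             current = current[part]
--
--     # Generate tree structure for top-level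
--     doc += "## Modules\n\n"
--
--     # Group modules by prefix (e.g., cli, common_utils, etc.)
--     prefixes = {}
--     for module in modules:
--         if module.count(".") == 0:
--             continue  # Skip the base package
--
--         prefix = module.split(".")[1]  # First component after the package name
--         if prefix not in prefixes:
--             prefixes[prefix] = []
--         prefixes[prefix].append(module)
--
--     # Generate documentation links for each group
--     for prefix, submodules in sorted(prefixes.items()):
--         doc += f"### {prefix}\n\n"
--
--         for module in sorted(submodules):
--             module_name = module.split(".")[-1]
--             relative_path = module.replace(PACKAGE_NAME + ".", "").replace(".", "/")
--             doc += f"- [{module_name}]({relative_path}.md)\n"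
--
--         doc += "\n"
--
--     return doc
-- ===== SOURCE B (Python) =====
-- PACKAGE_NAME = "enterprise_data_engineering"
--
-- _HEADER = (
--     f"# {PACKAGE_NAME} API Reference\n\n"
--     "This section provides detailed API documentation for all modules in the package.\n\n"
--     "## Modules\n\n"
-- )
--
--
-- def _link(module):
--     module_name = module.split(".")[-1]
--     relative_path = module.replace(PACKAGE_NAME + ".", "").replace(".", "/")
--     return f"- [{module_name}]({relative_path}.md)\n"
--
--
-- def _sections(mods):
--     """Selection recursion: emit the alphabetically first prefix's group, recurse on the rest."""
--     if not mods:
--         return ""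
--     p = min(m.split(".")[1] for m in mods)
--     group = sorted(m for m in mods if m.split(".")[1] == p)
--     rest = [m for m in mods if m.split(".")[1] != p]
--     return "### " + p + "\n\n" + "".join(_link(m) for m in group) + "\n" + _sections(rest)
--
--
-- def generate_package_index(modules: list[str]) -> str:
--     """Generate an index of all modules."""
--     return _HEADER + _sections([m for m in modules if "." in m])
-- ===== Notes on version B (the rewrite author's own statement) =====
-- stated objective: alternative
-- what changed: B drops A's dead module_tree and dict-of-lists grouping entirely and instead emits the sections by a selection recursion: repeatedly take the alphabetically smallest remaining prefix, emit its sorted group as a joined comprehension, and recurse on the remaining modules.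
import Mathlib
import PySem

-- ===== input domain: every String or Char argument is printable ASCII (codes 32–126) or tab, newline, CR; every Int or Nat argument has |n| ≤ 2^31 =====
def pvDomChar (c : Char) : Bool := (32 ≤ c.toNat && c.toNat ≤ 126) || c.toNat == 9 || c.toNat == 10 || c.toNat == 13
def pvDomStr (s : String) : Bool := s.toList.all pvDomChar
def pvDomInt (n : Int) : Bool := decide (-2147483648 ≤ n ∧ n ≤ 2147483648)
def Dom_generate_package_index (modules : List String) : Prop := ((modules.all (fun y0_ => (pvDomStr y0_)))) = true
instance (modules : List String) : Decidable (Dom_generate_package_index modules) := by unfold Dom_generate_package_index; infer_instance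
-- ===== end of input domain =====

-- B drops A's dead module_tree and dict-of-lists grouping and instead emits sections by a
-- selection recursion (smallest remaining prefix first, joined comprehensions); objective: alternative.

-- ===== PORT A =====
-- (A also builds a nested dict 'module_tree' that is never read afterwards; it has no effect
--  on the returned string and is not ported.)
def generate_package_index (modules : List String) : String :=
  let doc := "# enterprise_data_engineering API Reference\n\n"
  let doc := doc ++ "This section provides detailed API documentation for all modules in the package.\n\n"
  let doc := doc ++ "## Modules\n\n"
  let prefixes : PySem.Dict String (List String) :=
    modules.foldl (fun d module =>
      if PySem.Str.count module "." == 0 then d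
      else
        -- "if prefix not in prefixes: prefixes[prefix] = []" followed by append = Dict.modify
        -- split(".")[1] always exists here (the module contains a "."), so pyGetD is exact
        d.modify (PySem.List.pyGetD ((PySem.Str.split? module ".").getD []) 1 "") [] (fun l => l ++ [module]))
      PySem.Dict.empty
  -- sorted(prefixes.items()): dict keys are distinct, so Python's tuple sort orders by the key alone
  (PySem.List.sorted prefixes.items (fun pr => pr.1)).foldl (fun doc pr =>
    let doc := doc ++ "### " ++ pr.1 ++ "\n\n"
    let doc := (PySem.List.sorted pr.2 (fun m => m)).foldl (fun doc module =>
      let module_name := PySem.List.pyGetD ((PySem.Str.split? module ".").getD []) (-1) ""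
      let relative_path := PySem.Str.replace (PySem.Str.replace module "enterprise_data_engineering." "") "." "/"
      doc ++ "- [" ++ module_name ++ "](" ++ relative_path ++ ".md)\n") doc
    doc ++ "\n") doc

-- ===== PORT B =====
-- _link(module) of Source B
def pvLink (module : String) : String :=
  let module_name := PySem.List.pyGetD ((PySem.Str.split? module ".").getD []) (-1) ""
  let relative_path := PySem.Str.replace (PySem.Str.replace module "enterprise_data_engineering." "") "." "/"
  "- [" ++ module_name ++ "](" ++ relative_path ++ ".md)\n"

-- m.split(".")[1] (total here: only applied to modules containing a ".")
def pvPrefix (m : String) : String :=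
  PySem.List.pyGetD ((PySem.Str.split? m ".").getD []) 1 ""

-- _sections(mods) of Source B; the fuel argument (initially the list length) only makes the
-- recursion structural — it is never exhausted on the calls generate_package_index_alt makes
def pvSectionsGo : Nat → List String → String
  | _, [] => ""
  | 0, _ :: _ => ""
  | fuel + 1, m0 :: ms =>
    let mods := m0 :: ms
    let p := (PySem.List.min? (mods.map pvPrefix) (fun x => x)).getD ""
    let group := PySem.List.sorted (mods.filter (fun m => pvPrefix m == p)) (fun m => m)
    let rest := mods.filter (fun m => !(pvPrefix m == p))
    "### " ++ p ++ "\n\n" ++ PySem.Str.join "" (group.map pvLink) ++ "\n" ++ pvSectionsGo fuel rest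

def generate_package_index_alt (modules : List String) : String :=
  let dotted := modules.filter (fun m => PySem.Str.isIn "." m)
  "# enterprise_data_engineering API Reference\n\n"
    ++ "This section provides detailed API documentation for all modules in the package.\n\n"
    ++ "## Modules\n\n"
    ++ pvSectionsGo dotted.length dotted

-- ===== PRECONDITION & SPEC =====
def Spec_generate_package_index (modules : List String) (out : String) : Prop := out = generate_package_index_alt modules
instance (modules : List String) (out : String) : Decidable (Spec_generate_package_index modules out) := by unfold Spec_generate_package_index; infer_instance

-- ===== CLAIM (what is proved, stated in full; the proofs are below) =====
def Claim_equal_generate_package_index : Prop := ∀ (modules : List String), Dom_generate_package_index modules → Spec_generate_package_index modules (generate_package_index modules)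

-- ===== LEMMAS AND PROOFS =====

-- the section string emitted for prefix p when the dotted modules are l
def pvSection (l : List String) (p : String) : String :=
  "### " ++ p ++ "\n\n"
    ++ PySem.Str.join "" ((PySem.List.sorted (l.filter (fun m => pvPrefix m == p)) (fun m => m)).map pvLink)
    ++ "\n"

-- "".join over an empty / cons list of strings
theorem pv_join_nil : PySem.Str.join "" ([] : List String) = "" := rfl

theorem pv_flatten_intersperse_nil : ∀ (xs : List (List Char)),
    (List.intersperse ([] : List Char) xs).flatten = xs.flatten := by
  intro xs
  induction xs with
  | nil => rfl
  | cons a t ih =>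
    cases t with
    | nil => rfl
    | cons b t' => simpa using ih

theorem pv_join_cons (x : String) (xs : List String) :
    PySem.Str.join "" (x :: xs) = x ++ PySem.Str.join "" xs := by
  simp only [PySem.Str.join, PySem.Chars.join, List.intercalate, List.map]
  simp only [show ("" : String).toList = [] from rfl, pv_flatten_intersperse_nil]
  rw [List.flatten_cons, String.ofList_append, String.ofList_toList]

-- a foldl that appends f x at each step is init ++ "".join(map f)
theorem pv_foldl_append_join {α : Type} (f : α → String) :
    ∀ (xs : List α) (init : String),
    xs.foldl (fun d x => d ++ f x) init = init ++ PySem.Str.join "" (xs.map f) := by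
  intro xs
  induction xs with
  | nil => intro init; simp [pv_join_nil]
  | cons a t ih =>
    intro init
    simp only [List.foldl, List.map, pv_join_cons, ih, String.append_assoc]

-- the counting loop of str.count never returns less than its accumulator
theorem pv_count_go_le (sub : List Char) : ∀ (fuel : Nat) (s : List Char) (acc : Nat),
    acc ≤ PySem.Chars.count.go sub fuel s acc := by
  intro fuel
  induction fuel with
  | zero => intro s acc; simp [PySem.Chars.count.go]
  | succ n ih =>
    intro s acc
    cases s with
    | nil => simp [PySem.Chars.count.go]
    | cons h t =>
      simp only [PySem.Chars.count.go]
      split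
      · exact le_trans (Nat.le_succ acc) (ih _ _)
      · exact ih _ _

-- with enough fuel and a nonempty pattern, the count loop returns its accumulator
-- exactly when the pattern does not occur
theorem pv_count_go_eq_acc_iff (sub : List Char) (hsub : sub ≠ []) :
    ∀ (fuel : Nat) (s : List Char) (acc : Nat), s.length ≤ fuel →
    (PySem.Chars.count.go sub fuel s acc = acc ↔ ¬ sub <:+: s) := by
  intro fuel
  induction fuel with
  | zero =>
    intro s acc hlen
    have hs : s = [] := List.eq_nil_of_length_eq_zero (Nat.le_zero.mp hlen)
    subst hs
    simp [PySem.Chars.count.go, List.infix_iff_prefix_suffix]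
    intro h; exact hsub h
  | succ n ih =>
    intro s acc hlen
    cases s with
    | nil =>
      simp [PySem.Chars.count.go, List.infix_iff_prefix_suffix]
      intro h; exact hsub h
    | cons h t =>
      simp only [PySem.Chars.count.go]
      split
      · rename_i hpre
        constructor
        · intro habs
          have := pv_count_go_le sub n (List.drop sub.length (h :: t)) (acc + 1)
          omega
        · intro hni
          exact absurd ((List.infix_cons_iff).mpr (Or.inl (List.isPrefixOf_iff_prefix.mp hpre))) hni
      · rename_i hpre
        have hlt : t.length ≤ n := by simpa using hlen
        rw [ih t acc hlt]
        constructor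
        · intro hni hinf
          rcases (List.infix_cons_iff).mp hinf with hp | hi
          · exact hpre (List.isPrefixOf_iff_prefix.mpr hp)
          · exact hni hi
        · intro hni hi
          exact hni ((List.infix_cons_iff).mpr (Or.inr hi))

-- A's skip condition 'module.count(".") == 0' is exactly B's '"." not in module'
theorem pv_cond_eq (m : String) : (PySem.Str.count m "." == 0) = !(PySem.Str.isIn "." m) := by
  have h := pv_count_go_eq_acc_iff ['.'] (by simp) m.toList.length m.toList 0 (le_refl _)
  have hc : PySem.Chars.count m.toList ['.'] = PySem.Chars.count.go ['.'] m.toList.length m.toList 0 := by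
    simp [PySem.Chars.count]
  rw [PySem.Str.isIn_eq, show ".".toList = ['.'] from rfl]
  cases hin : PySem.Chars.isIn ['.'] m.toList
  · have hni : ¬ ['.'] <:+: m.toList := (PySem.Chars.isIn_eq_false_iff ['.'] m.toList).mp hin
    have h0 : PySem.Chars.count m.toList ['.'] = 0 := by rw [hc]; exact h.mpr hni
    simpa using h0
  · have hocc : ['.'] <:+: m.toList := (PySem.Chars.isIn_iff_infix ['.'] m.toList).mp hin
    have hne : PySem.Chars.count m.toList ['.'] ≠ 0 := by
      rw [hc]; intro hz; exact (h.mp hz) hocc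
    simpa using hne

-- a fold that skips on a Bool condition is the fold over the filtered list
theorem pv_foldl_skip {α β : Type} (c : α → Bool) (g : β → α → β) :
    ∀ (l : List α) (init : β),
    l.foldl (fun b a => if !(c a) then b else g b a) init = (l.filter c).foldl g init := by
  intro l
  induction l with
  | nil => intro init; rfl
  | cons x xs ih =>
    intro init
    cases hx : c x
    · simpa [hx] using ih init
    · simpa [hx] using ih (g init x)

-- the grouping dict of A: its lookup at c is the sublist of modules with prefix c
theorem pv_dict_getD (l : List String) (pf : String → String) (c : String) :
    ((l.foldl (fun d m => d.modify (pf m) [] (fun t => t ++ [m]))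
        (PySem.Dict.empty : PySem.Dict String (List String))).getD c [])
    = l.filter (fun m => pf m == c) := by
  have h := PySem.Dict.getD_foldl_modify_append (l := l.map (fun m => (pf m, m)))
    (d := (PySem.Dict.empty : PySem.Dict String (List String))) (c := c)
  rw [List.foldl_map] at h
  have hE : (PySem.Dict.empty : PySem.Dict String (List String)).getD c [] = [] := rfl
  simpa [List.filter_map, Function.comp_def, List.map_map, hE] using h

-- its keys are the distinct prefixes in first-occurrence order
theorem pv_dict_keys (l : List String) (pf : String → String) :
    ((l.foldl (fun d m => d.modify (pf m) [] (fun t => t ++ [m]))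
        (PySem.Dict.empty : PySem.Dict String (List String))).keys)
    = PySem.Set.ofList (l.map pf) := by
  rw [PySem.Dict.keys_foldl_modify_key l pf [] (fun _ m => fun t => t ++ [m])]
  rfl

theorem pv_dict_nodup (l : List String) (pf : String → String) :
    ((l.foldl (fun d m => d.modify (pf m) [] (fun t => t ++ [m]))
        (PySem.Dict.empty : PySem.Dict String (List String))).keys).Nodup := by
  apply PySem.Dict.nodup_keys_foldl_modify_key l pf [] (fun _ m => fun t => t ++ [m])
  simp [pysem]

-- A's sorted dict items are exactly the sorted distinct prefixes paired with their filtered groups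
theorem pv_sorted_items (l : List String) (pf : String → String) :
    PySem.List.sorted
      (l.foldl (fun d m => d.modify (pf m) [] (fun t => t ++ [m]))
        (PySem.Dict.empty : PySem.Dict String (List String))).items
      (fun pr => pr.1)
    = (PySem.List.sorted (PySem.Set.ofList (l.map pf)) (fun p => p)).map
        (fun p => (p, l.filter (fun m => pf m == p))) := by
  have hk := pv_dict_keys l pf
  have hnd := pv_dict_nodup l pf
  have hitems : (l.foldl (fun d m => d.modify (pf m) [] (fun t => t ++ [m]))
        (PySem.Dict.empty : PySem.Dict String (List String))).items
      = (PySem.Set.ofList (l.map pf)).map (fun k => (k, l.filter (fun m => pf m == k))) := by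
    rw [PySem.Dict.items_eq_map_keys _ hnd [], hk]
    exact List.map_congr_left (fun k _ => by rw [pv_dict_getD])
  apply PySem.List.sorted_eq_of_perm_of_pairwise_lt
  · rw [hitems]
    exact (PySem.List.sorted_perm (PySem.Set.ofList (l.map pf)) (fun p => p) false).map _
  · rw [List.pairwise_map]
    exact PySem.List.sorted_ofList_pairwise_lt (l.map pf)

-- folding the inline prefix expression into pvPrefix (definitional)
theorem pv_pf_fold (m : String) :
    PySem.List.pyGetD ((PySem.Str.split? m ".").getD []) 1 "" = pvPrefix m := rfl

-- A's outer loop over the sorted prefixes appends one section per prefix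
theorem pv_outer (l : List String) (init : String) :
    (PySem.List.sorted (PySem.Set.ofList (l.map pvPrefix)) (fun p => p)).foldl
      (fun doc p =>
        (PySem.List.sorted (l.filter (fun m => pvPrefix m == p)) (fun m => m)).foldl
          (fun doc module =>
            doc ++ "- [" ++ PySem.List.pyGetD ((PySem.Str.split? module ".").getD []) (-1) ""
                ++ "](" ++ PySem.Str.replace (PySem.Str.replace module "enterprise_data_engineering." "") "." "/"
                ++ ".md)\n")
          (doc ++ "### " ++ p ++ "\n\n") ++ "\n") init
    = init ++ PySem.Str.join ""
        ((PySem.List.sorted (PySem.Set.ofList (l.map pvPrefix)) (fun p => p)).map (pvSection l)) := by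
  have hf : (fun (doc : String) (module : String) =>
      doc ++ "- [" ++ PySem.List.pyGetD ((PySem.Str.split? module ".").getD []) (-1) ""
          ++ "](" ++ PySem.Str.replace (PySem.Str.replace module "enterprise_data_engineering." "") "." "/"
          ++ ".md)\n")
      = (fun (doc : String) (module : String) => doc ++ pvLink module) := by
    funext d m
    simp [pvLink, String.append_assoc]
  have hstep : (fun (doc : String) (p : String) =>
      (PySem.List.sorted (l.filter (fun m => pvPrefix m == p)) (fun m => m)).foldl
        (fun doc module =>
          doc ++ "- [" ++ PySem.List.pyGetD ((PySem.Str.split? module ".").getD []) (-1) ""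
              ++ "](" ++ PySem.Str.replace (PySem.Str.replace module "enterprise_data_engineering." "") "." "/"
              ++ ".md)\n")
        (doc ++ "### " ++ p ++ "\n\n") ++ "\n")
      = (fun (doc : String) (p : String) => doc ++ pvSection l p) := by
    funext doc p
    rw [hf, pv_foldl_append_join pvLink]
    simp [pvSection, String.append_assoc]
  rw [hstep, pv_foldl_append_join (pvSection l)]

-- B's selection recursion produces the concatenation of the sections of the sorted
-- distinct prefixes (when given enough fuel)
theorem pv_sectionsGo_eq : ∀ (fuel : Nat) (l : List String), l.length ≤ fuel →
    pvSectionsGo fuel l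
    = PySem.Str.join ""
        ((PySem.List.sorted (PySem.Set.ofList (l.map pvPrefix)) (fun p => p)).map (pvSection l)) := by
  intro fuel
  induction fuel with
  | zero =>
    intro l hl
    have hnil : l = [] := List.eq_nil_of_length_eq_zero (Nat.le_zero.mp hl)
    subst hnil
    rfl
  | succ fuel ih =>
    intro l hl
    cases hL : l with
    | nil => rfl
    | cons m0 ms =>
      subst hL
      -- the sorted distinct prefixes are nonempty
      obtain ⟨q, Q, hP⟩ : ∃ q Q,
          PySem.List.sorted (PySem.Set.ofList ((m0 :: ms).map pvPrefix)) (fun p => p) = q :: Q := by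
        cases hs : PySem.List.sorted (PySem.Set.ofList ((m0 :: ms).map pvPrefix)) (fun p => p) with
        | nil =>
          exfalso
          have h0 := (PySem.List.sorted_eq_nil_iff _ _ _).mp hs
          have : pvPrefix m0 ∈ PySem.Set.ofList ((m0 :: ms).map pvPrefix) :=
            (PySem.Set.mem_ofList _ _).mpr (by simp)
          rw [h0] at this
          exact absurd this (List.not_mem_nil)
        | cons a b => exact ⟨a, b, rfl⟩
      have hqmem : q ∈ (m0 :: ms).map pvPrefix := by
        have : q ∈ PySem.List.sorted (PySem.Set.ofList ((m0 :: ms).map pvPrefix)) (fun p => p) := by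
          rw [hP]; exact List.mem_cons_self
        exact (PySem.Set.mem_ofList _ _).mp ((PySem.List.mem_sorted _ _ _ _).mp this)
      -- the alphabetically least prefix is q, the head of the sorted distinct prefixes
      have hmin : (PySem.List.min? ((m0 :: ms).map pvPrefix) (fun x => x)).getD "" = q := by
        cases hm : PySem.List.min? ((m0 :: ms).map pvPrefix) (fun x => x) with
        | none =>
          exfalso
          have := (PySem.List.min?_eq_none_iff _ _).mp hm
          simp at this
        | some v =>
          have hvq : v ≤ q := PySem.List.min?_isMin hm q hqmem
          have hqv : q ≤ v := by
            have hv1 : v ∈ PySem.Set.ofList ((m0 :: ms).map pvPrefix) :=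
              (PySem.Set.mem_ofList _ _).mpr (PySem.List.min?_mem hm)
            exact PySem.List.key_head_sorted_le _ _ hP v hv1
          simp [le_antisymm hvq hqv]
      have hpair : (q :: Q).Pairwise (fun a b => a < b) := by
        rw [← hP]; exact PySem.List.sorted_ofList_pairwise_lt _
      have hqlt : ∀ x ∈ Q, q < x := (List.pairwise_cons.mp hpair).1
      have hQp : Q.Pairwise (fun a b => a < b) := (List.pairwise_cons.mp hpair).2
      have hQnd : Q.Nodup := hQp.imp (fun h => ne_of_lt h)
      -- the modules thrown away all have prefix q, the rest keep their groups
      have hrest_mem : ∀ x, x ∈ ((m0 :: ms).filter (fun m => !(pvPrefix m == q))).map pvPrefix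
          ↔ x ∈ Q := by
        intro x
        constructor
        · intro hx
          obtain ⟨m, hm, hpf⟩ := List.mem_map.mp hx
          have hmem := List.mem_filter.mp hm
          have hxq : x ≠ q := by
            intro h
            rw [← hpf] at h
            simp [h] at hmem
          have : x ∈ q :: Q := by
            rw [← hP, PySem.List.mem_sorted, PySem.Set.mem_ofList]
            exact List.mem_map.mpr ⟨m, hmem.1, hpf⟩
          exact (List.mem_cons.mp this).resolve_left hxq
        · intro hx
          have hxq : x ≠ q := ne_of_gt (hqlt x hx)
          have : x ∈ (m0 :: ms).map pvPrefix := by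
            have : x ∈ q :: Q := List.mem_cons_of_mem _ hx
            rw [← hP, PySem.List.mem_sorted, PySem.Set.mem_ofList] at this
            exact this
          obtain ⟨m, hm, hpf⟩ := List.mem_map.mp this
          exact List.mem_map.mpr ⟨m, List.mem_filter.mpr ⟨hm, by simp [hpf, hxq]⟩, hpf⟩
      have hPrest : PySem.List.sorted
          (PySem.Set.ofList (((m0 :: ms).filter (fun m => !(pvPrefix m == q))).map pvPrefix))
          (fun p => p) = Q := by
        apply PySem.List.sorted_id_eq_of_perm_of_pairwise
        · exact ((List.perm_ext_iff_of_nodup hQnd (PySem.Set.nodup_ofList _)).mpr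
            (fun a => by rw [PySem.Set.mem_ofList]; exact (hrest_mem a).symm))
        · exact hQp.imp (fun h => le_of_lt h)
      have hlen : ((m0 :: ms).filter (fun m => !(pvPrefix m == q))).length ≤ fuel := by
        obtain ⟨m, hm, hpf⟩ := List.mem_map.mp hqmem
        have hlt : ((m0 :: ms).filter (fun m => !(pvPrefix m == q))).length < (m0 :: ms).length := by
          apply List.length_filter_lt_length_iff_exists.mpr
          exact ⟨m, hm, by simp [hpf]⟩
        simp only [List.length_cons] at hlt hl
        omega
      -- put the pieces together
      have hsec : ∀ p' ∈ Q,
          pvSection ((m0 :: ms).filter (fun m => !(pvPrefix m == q))) p' = pvSection (m0 :: ms) p' := by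
        intro p' hp'
        have hpq : p' ≠ q := ne_of_gt (hqlt p' hp')
        have hfil : ((m0 :: ms).filter (fun m => !(pvPrefix m == q))).filter
              (fun m => pvPrefix m == p') = (m0 :: ms).filter (fun m => pvPrefix m == p') := by
          rw [List.filter_filter]
          apply List.filter_congr
          intro m _
          by_cases h : pvPrefix m = p'
          · simp [h, hpq]
          · simp [h]
        simp only [pvSection, hfil]
      rw [hP, List.map_cons, pv_join_cons]
      simp only [pvSectionsGo]
      simp only [hmin]
      rw [ih _ hlen, hPrest, List.map_congr_left hsec]
      simp [pvSection, String.append_assoc]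

-- ===== VERDICT (by name: the statement is the Claim_ definition above) =====
theorem generate_package_index_spec : Claim_equal_generate_package_index := by
  intro modules _
  unfold Spec_generate_package_index generate_package_index generate_package_index_alt
  dsimp only
  simp only [pv_cond_eq, pv_foldl_skip, pv_pf_fold]
  rw [pv_sorted_items, List.foldl_map, pv_sectionsGo_eq _ _ (le_refl _)]
  dsimp only
  rw [pv_outer]
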